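-- pv_equiv track=rewrite | github.com/ty-hayes-82/simulation | golfsim/analysis/delivery_runner_metrics.py | _calculate_capacity_15min_window
-- ===== SOURCE A (Python) =====
-- from typing import Any, Dict, List
--
-- def _calculate_capacity_15min_window(orders: List[Dict[str, Any]], sla_minutes: int) -> int:
--     """Calculate maximum orders that can be processed in a 15-minute window before SLA breach."""
--     if not orders:
--         return 0
--
--     # Group orders by 15-minute windows
--     window_size = 15 * 60  # 15 minutes in seconds
--     sla_seconds = sla_minutes * 60
--
--     windows = {}
--
--     for order in orders:
--         order_time_s = order.get('order_time_s', 0)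
--         # Only count orders within SLA window
--         if order_time_s <= sla_seconds:
--             window_index = int(order_time_s // window_size)
--             if window_index not in windows:
--                 windows[window_index] = 0
--             windows[window_index] += 1
--
--     return max(windows.values()) if windows else 0
-- ===== SOURCE B (Python) =====
-- def _calculate_capacity_15min_window(orders, sla_minutes):
--     """Calculate maximum orders that can be processed in a 15-minute window before SLA breach."""
--     sla_seconds = sla_minutes * 60
--     window_indices = sorted(
--         order.get('order_time_s', 0) // 900
--         for order in orders
--         if order.get('order_time_s', 0) <= sla_seconds
--     )
--     if not window_indices:
--         return 0
--     best = run = 1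
--     prev = window_indices[0]
--     for w in window_indices[1:]:
--         run = run + 1 if w == prev else 1
--         best = max(best, run)
--         prev = w
--     return best
-- ===== Notes on version B (the rewrite author's own statement) =====
-- stated objective: alternative
-- what changed: Replaces the hash-map counter (dict of per-window counts, then max over values) with a sort of the qualifying window indices followed by a single run-length scan that tracks the longest run of equal indices.
import Mathlib
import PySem

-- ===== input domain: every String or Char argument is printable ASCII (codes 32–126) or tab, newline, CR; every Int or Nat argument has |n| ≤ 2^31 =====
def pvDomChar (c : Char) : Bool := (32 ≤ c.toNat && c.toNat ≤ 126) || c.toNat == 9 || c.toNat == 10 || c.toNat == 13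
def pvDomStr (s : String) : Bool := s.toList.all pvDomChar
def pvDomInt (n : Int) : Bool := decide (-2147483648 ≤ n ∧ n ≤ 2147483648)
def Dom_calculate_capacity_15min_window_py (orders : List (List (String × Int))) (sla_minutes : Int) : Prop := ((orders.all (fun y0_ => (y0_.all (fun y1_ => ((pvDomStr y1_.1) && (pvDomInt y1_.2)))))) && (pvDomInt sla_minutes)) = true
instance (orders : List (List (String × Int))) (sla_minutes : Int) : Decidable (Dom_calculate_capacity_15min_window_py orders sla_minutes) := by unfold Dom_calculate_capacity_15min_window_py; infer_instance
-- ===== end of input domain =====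

-- B replaces A's dict-of-counts-then-max with a sort of the qualifying window indices
-- followed by a single run-length scan (alternative algorithm, same result).

-- ===== PORT A =====
def calculate_capacity_15min_window_py (orders : List (List (String × Int))) (sla_minutes : Int) : Int :=
  if orders = [] then 0
  else
    let window_size : Int := 15 * 60
    let sla_seconds : Int := sla_minutes * 60
    let windows : PySem.Dict Int Int :=
      orders.foldl (fun d order =>
        let order_time_s := (PySem.Dict.mk order).getD "order_time_s" 0
        if order_time_s ≤ sla_seconds then
          let window_index := PySem.Int.floordiv order_time_s window_size
          let d1 := if d.contains window_index then d else d.insert window_index 0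
          d1.insert window_index (d1.getD window_index 0 + 1)
        else d) PySem.Dict.empty
    if windows.size ≠ 0 then (PySem.List.max? windows.values (fun v => v)).getD 0 else 0

-- ===== PORT B =====
-- run-length scan over the already-sorted index list (helper of Source B's loop)
def pvRunScan (best run prev : Int) : List Int → Int
  | [] => best
  | w :: rs =>
    let run' := if w = prev then run + 1 else 1
    pvRunScan (max best run') run' w rs

def calculate_capacity_15min_window_py_alt (orders : List (List (String × Int))) (sla_minutes : Int) : Int :=
  let sla_seconds : Int := sla_minutes * 60
  let window_indices : List Int :=
    PySem.List.sorted
      ((orders.filter (fun order => (PySem.Dict.mk order).getD "order_time_s" 0 ≤ sla_seconds)).map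
        (fun order => PySem.Int.floordiv ((PySem.Dict.mk order).getD "order_time_s" 0) 900))
      (fun x => x) false
  match window_indices with
  | [] => 0
  | w :: rest => pvRunScan 1 1 w rest

-- ===== PRECONDITION & SPEC =====
def Spec_calculate_capacity_15min_window_py (orders : List (List (String × Int))) (sla_minutes : Int) (out : Int) : Prop := out = calculate_capacity_15min_window_py_alt orders sla_minutes
instance (orders : List (List (String × Int))) (sla_minutes : Int) (out : Int) : Decidable (Spec_calculate_capacity_15min_window_py orders sla_minutes out) := by unfold Spec_calculate_capacity_15min_window_py; infer_instance

-- ===== CLAIM (what is proved, stated in full; the proofs are below) =====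
def Claim_equal_calculate_capacity_15min_window_py : Prop := ∀ (orders : List (List (String × Int))) (sla_minutes : Int), Dom_calculate_capacity_15min_window_py orders sla_minutes → Spec_calculate_capacity_15min_window_py orders sla_minutes (calculate_capacity_15min_window_py orders sla_minutes)

-- ===== LEMMAS AND PROOFS =====

-- the list of qualifying window indices, shared shape of both sides
def pvWs (orders : List (List (String × Int))) (sla_minutes : Int) : List Int :=
  (orders.filter (fun order => (PySem.Dict.mk order).getD "order_time_s" 0 ≤ sla_minutes * 60)).map
    (fun order => PySem.Int.floordiv ((PySem.Dict.mk order).getD "order_time_s" 0) 900)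

-- A's "ensure key then increment" body is the plain counter step
lemma pvStepA_eq (d : PySem.Dict Int Int) (w : Int) :
    (let d1 := if d.contains w then d else d.insert w 0
     d1.insert w (d1.getD w 0 + 1)) = d.insert w (d.getD w 0 + 1) := by
  by_cases h : d.contains w = true
  · simp [h]
  · simp only [Bool.not_eq_true] at h
    simp [h, PySem.Dict.getD_insert_self, PySem.Dict.insert_insert_self,
      PySem.Dict.getD_of_not_contains d 0 h]

-- A's dict loop builds Counter(pvWs orders sla_minutes)
lemma pvFold_eq_counter (orders : List (List (String × Int))) (sla_minutes : Int) :
    orders.foldl (fun d order =>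
        let order_time_s := (PySem.Dict.mk order).getD "order_time_s" 0
        if order_time_s ≤ sla_minutes * 60 then
          let window_index := PySem.Int.floordiv order_time_s (15 * 60)
          let d1 := if d.contains window_index then d else d.insert window_index 0
          d1.insert window_index (d1.getD window_index 0 + 1)
        else d) PySem.Dict.empty
      = PySem.Dict.counter (pvWs orders sla_minutes) := by
  rw [← PySem.Dict.foldl_insert_getD_add_one_eq_counter, pvWs, List.foldl_map, List.foldl_filter]
  apply PySem.List.foldl_congr_mem
  intro d o _
  by_cases h : (PySem.Dict.mk o).getD "order_time_s" 0 ≤ sla_minutes * 60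
  · simpa [h] using pvStepA_eq d (PySem.Int.floordiv ((PySem.Dict.mk o).getD "order_time_s" 0) 900)
  · simp [h]

lemma pvCounter_size_eq (xs : List Int) :
    (PySem.Dict.counter xs).size = (PySem.Set.ofList xs).length := by
  have h : (PySem.Dict.counter xs).keys.length = (PySem.Set.ofList xs).length := by
    rw [PySem.Dict.keys_counter]
  simpa [PySem.Dict.size, PySem.Dict.keys] using h

lemma pvOfList_eq_nil_iff (xs : List Int) : PySem.Set.ofList xs = [] ↔ xs = [] := by
  constructor
  · intro h
    cases xs with
    | nil => rfl
    | cons x t =>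
      exfalso
      have : x ∈ PySem.Set.ofList (x :: t) := by
        rw [PySem.Set.mem_ofList]; exact List.mem_cons_self
      simp [h] at this
  · intro h; subst h; rfl

-- upper bound: the scan's result dominates best and every multiplicity
lemma pvRunScan_ub (rest : List Int) : ∀ (best run prev : Int),
    rest.Pairwise (· ≤ ·) → (∀ x ∈ rest, prev ≤ x) → 1 ≤ run → run ≤ best →
    best ≤ pvRunScan best run prev rest ∧
    ∀ k : Int, (if k = prev then run else 0) + (rest.count k : Int) ≤ pvRunScan best run prev rest := by
  induction rest with
  | nil =>
    intro best run prev _ _ h1 h2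
    simp only [pvRunScan]
    refine ⟨le_refl _, fun k => ?_⟩
    simp only [List.count_nil, Nat.cast_zero, add_zero]
    split <;> omega
  | cons w rs ih =>
    intro best run prev hp hlb h1 h2
    have hw : prev ≤ w := hlb w List.mem_cons_self
    have hrs : rs.Pairwise (· ≤ ·) := hp.of_cons
    have hwrs : ∀ x ∈ rs, w ≤ x := fun x hx => (List.pairwise_cons.mp hp).1 x hx
    by_cases hwp : w = prev
    · have step : pvRunScan best run prev (w :: rs)
          = pvRunScan (max best (run + 1)) (run + 1) w rs := by
        simp [pvRunScan, hwp]
      obtain ⟨hb, hk⟩ := ih (max best (run + 1)) (run + 1) w hrs hwrs (by omega) (le_max_right _ _)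
      constructor
      · rw [step]; exact le_trans (le_max_left _ _) hb
      · intro k
        rw [step]
        have := hk k
        by_cases hkw : k = w
        · subst hkw
          rw [← hwp]
          simp only [List.count_cons_self]
          push_cast at this ⊢
          omega
        · have hkp : ¬ (k = prev) := by rw [← hwp]; exact hkw
          simp only [if_neg hkw] at this
          simp only [if_neg hkp, List.count_cons_of_ne (Ne.symm hkw)]
          omega
    · have step : pvRunScan best run prev (w :: rs)
          = pvRunScan (max best 1) 1 w rs := by
        simp [pvRunScan, hwp]
      obtain ⟨hb, hk⟩ := ih (max best 1) 1 w hrs hwrs le_rfl (le_max_right _ _)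
      have hltw : prev < w := lt_of_le_of_ne hw (fun e => hwp e.symm)
      have hpnotin : prev ∉ rs := fun hmem => absurd (lt_of_lt_of_le hltw (hwrs prev hmem)) (lt_irrefl _)
      constructor
      · rw [step]; exact le_trans (le_max_left _ _) hb
      · intro k
        rw [step]
        have := hk k
        by_cases hkp : k = prev
        · subst hkp
          have hc : (w :: rs).count k = 0 := by
            rw [List.count_eq_zero]
            intro hmem
            rcases List.mem_cons.mp hmem with h | h
            · exact hwp h.symm
            · exact hpnotin h
          simp only [hc]
          have : best ≤ pvRunScan (max best 1) 1 w rs := le_trans (le_max_left _ _) hb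
          push_cast
          omega
        · by_cases hkw : k = w
          · subst hkw
            simp only [if_neg hkp, List.count_cons_self]
            push_cast at this ⊢
            omega
          · simp only [if_neg hkw] at this
            simp only [if_neg hkp, List.count_cons_of_ne (Ne.symm hkw)]
            omega

-- the scan's result is attained: it is best, or the multiplicity of some scanned value
lemma pvRunScan_mem (rest : List Int) : ∀ (best run prev : Int),
    rest.Pairwise (· ≤ ·) → (∀ x ∈ rest, prev ≤ x) → 1 ≤ run → run ≤ best →
    pvRunScan best run prev rest = best ∨
    pvRunScan best run prev rest = run + (rest.count prev : Int) ∨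
    ∃ k ∈ rest, k ≠ prev ∧ pvRunScan best run prev rest = (rest.count k : Int) := by
  induction rest with
  | nil =>
    intro best run prev _ _ _ _
    exact Or.inl rfl
  | cons w rs ih =>
    intro best run prev hp hlb h1 h2
    have hw : prev ≤ w := hlb w List.mem_cons_self
    have hrs : rs.Pairwise (· ≤ ·) := hp.of_cons
    have hwrs : ∀ x ∈ rs, w ≤ x := fun x hx => (List.pairwise_cons.mp hp).1 x hx
    by_cases hwp : w = prev
    · have step : pvRunScan best run prev (w :: rs)
          = pvRunScan (max best (run + 1)) (run + 1) w rs := by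
        simp [pvRunScan, hwp]
      rcases ih (max best (run + 1)) (run + 1) w hrs hwrs (by omega) (le_max_right _ _) with h | h | ⟨k, hk, hkne, hkc⟩
      · -- result = max best (run+1)
        rcases le_total (run + 1) best with hle | hle
        · left; rw [step, h, max_eq_left hle]
        · -- result = run + 1; then no further prev's occur (by the upper bound)
          obtain ⟨_, hub⟩ := pvRunScan_ub rs (max best (run + 1)) (run + 1) w hrs hwrs (by omega) (le_max_right _ _)
          have hub2 : run + 1 + (rs.count w : Int) ≤ pvRunScan (max best (run + 1)) (run + 1) w rs := by
            have := hub w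
            simpa using this
          rw [h] at hub2
          have hmx : max best (run + 1) = run + 1 := max_eq_right hle
          rw [hmx] at hub2
          have hc0 : rs.count w = 0 := by omega
          right; left
          rw [step, h, hmx, ← hwp, List.count_cons_self, hc0]
          push_cast; omega
      · right; left
        rw [step, h, ← hwp, List.count_cons_self]
        push_cast; omega
      · right; right
        have hkw : k ≠ w := hkne
        refine ⟨k, List.mem_cons_of_mem _ hk, by rw [← hwp]; exact hkw, ?_⟩
        rw [step, hkc, List.count_cons_of_ne (Ne.symm hkw)]
    · have step : pvRunScan best run prev (w :: rs)
          = pvRunScan (max best 1) 1 w rs := by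
        simp [pvRunScan, hwp]
      have hbm : max best 1 = best := max_eq_left (by omega)
      rcases ih (max best 1) 1 w hrs hwrs le_rfl (le_max_right _ _) with h | h | ⟨k, hk, hkne, hkc⟩
      · left; rw [step, h, hbm]
      · right; right
        refine ⟨w, List.mem_cons_self, fun e => hwp e, ?_⟩
        rw [step, h, List.count_cons_self]
        push_cast; omega
      · right; right
        have hltw : prev < w := lt_of_le_of_ne hw (fun e => hwp e.symm)
        have hkprev : k ≠ prev := by
          intro e; subst e
          exact absurd (lt_of_lt_of_le hltw (hwrs k hk)) (lt_irrefl _)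
        refine ⟨k, List.mem_cons_of_mem _ hk, hkprev, ?_⟩
        rw [step, hkc, List.count_cons_of_ne (Ne.symm hkne)]

-- ===== VERDICT (by name: the statement is the Claim_ definition above) =====
theorem calculate_capacity_15min_window_py_spec : Claim_equal_calculate_capacity_15min_window_py := by
  intro orders sla_minutes _
  unfold Spec_calculate_capacity_15min_window_py
  unfold calculate_capacity_15min_window_py calculate_capacity_15min_window_py_alt
  simp only []
  by_cases hord : orders = []
  · subst hord; rfl
  · rw [if_neg hord, pvFold_eq_counter orders sla_minutes]
    set ws := pvWs orders sla_minutes with hws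
    have hsorted_def : PySem.List.sorted
        ((orders.filter (fun order => (PySem.Dict.mk order).getD "order_time_s" 0 ≤ sla_minutes * 60)).map
          (fun order => PySem.Int.floordiv ((PySem.Dict.mk order).getD "order_time_s" 0) 900))
        (fun x => x) false = PySem.List.sorted ws (fun x => x) false := rfl
    rw [hsorted_def]
    by_cases hwse : ws = []
    · rw [hwse]
      simp [PySem.List.sorted, pvCounter_size_eq]
    · -- nonempty case
      have hsz : (PySem.Dict.counter ws).size ≠ 0 := by
        rw [pvCounter_size_eq]
        intro h
        exact hwse ((pvOfList_eq_nil_iff ws).mp (List.length_eq_zero_iff.mp h))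
      rw [if_pos hsz]
      -- A's side: m = max of the counter's values
      have hvals : (PySem.Dict.counter ws).values
          = (PySem.Set.ofList ws).map (fun k => ((ws.count k : Nat) : Int)) := by
        rw [PySem.Dict.values_eq_map_keys _ (PySem.Dict.nodup_keys_counter ws) 0,
          PySem.Dict.keys_counter]
        apply List.map_congr_left
        intro k _
        rw [PySem.Dict.getD_counter]
      have hvne : (PySem.Dict.counter ws).values ≠ [] := by
        rw [hvals]
        simp only [ne_eq, List.map_eq_nil_iff]
        exact fun h => hwse ((pvOfList_eq_nil_iff ws).mp h)
      obtain ⟨m, hm⟩ : ∃ m, PySem.List.max? (PySem.Dict.counter ws).values (fun v => v) = some m := by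
        cases hmx : PySem.List.max? (PySem.Dict.counter ws).values (fun v => v) with
        | none => exact absurd ((PySem.List.max?_eq_none_iff _ _).mp hmx) hvne
        | some m => exact ⟨m, rfl⟩
      rw [hm, Option.getD_some]
      -- m attains some multiplicity and bounds all of them
      have hmmem : ∃ k ∈ ws, m = ((ws.count k : Nat) : Int) := by
        have := PySem.List.max?_mem hm
        rw [hvals] at this
        obtain ⟨k, hk, he⟩ := List.mem_map.mp this
        exact ⟨k, (PySem.Set.mem_ofList _ _).mp hk, he.symm⟩
      have hmub : ∀ k ∈ ws, ((ws.count k : Nat) : Int) ≤ m := by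
        intro k hk
        have hin : ((ws.count k : Nat) : Int) ∈ (PySem.Dict.counter ws).values := by
          rw [hvals]
          exact List.mem_map.mpr ⟨k, (PySem.Set.mem_ofList _ _).mpr hk, rfl⟩
        exact PySem.List.max?_isMax hm _ hin
      -- B's side
      obtain ⟨w, rest, hsrt⟩ : ∃ w rest, PySem.List.sorted ws (fun x => x) false = w :: rest := by
        cases hs : PySem.List.sorted ws (fun x => x) false with
        | nil => exact absurd ((PySem.List.sorted_eq_nil_iff _ _ _).mp hs) hwse
        | cons w rest => exact ⟨w, rest, rfl⟩
      rw [hsrt]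
      have hperm : (w :: rest).Perm ws := by rw [← hsrt]; exact PySem.List.sorted_perm ws _ _
      have hpair : (w :: rest).Pairwise (· ≤ ·) := by
        have := PySem.List.sorted_pairwise ws (fun x => x)
        rw [hsrt] at this
        exact this
      have hrp : rest.Pairwise (· ≤ ·) := hpair.of_cons
      have hrlb : ∀ x ∈ rest, w ≤ x := fun x hx => (List.pairwise_cons.mp hpair).1 x hx
      have hcount : ∀ k : Int, (w :: rest).count k = ws.count k := fun k => hperm.count_eq k
      obtain ⟨_, hub⟩ := pvRunScan_ub rest 1 1 w hrp hrlb le_rfl le_rfl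
      have h1 : m ≤ pvRunScan 1 1 w rest := by
        obtain ⟨k0, hk0, hk0e⟩ := hmmem
        have hb := hub k0
        have hc : (if k0 = w then (1:Int) else 0) + (rest.count k0 : Int) = ((w :: rest).count k0 : Int) := by
          by_cases hkw : k0 = w
          · subst hkw; rw [List.count_cons_self, if_pos rfl]; omega
          · rw [List.count_cons_of_ne (Ne.symm hkw), if_neg hkw]; omega
        rw [hc, hcount k0] at hb
        rw [hk0e]; exact hb
      have h2 : pvRunScan 1 1 w rest ≤ m := by
        rcases pvRunScan_mem rest 1 1 w hrp hrlb le_rfl le_rfl with h | h | ⟨k, hk, hkne, hkc⟩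
        · obtain ⟨k0, hk0, hk0e⟩ := hmmem
          have hpos : 1 ≤ ws.count k0 := List.count_pos_iff.mpr hk0
          rw [h, hk0e]
          exact_mod_cast hpos
        · have hcw : pvRunScan 1 1 w rest = ((w :: rest).count w : Int) := by
            rw [h, List.count_cons_self]; push_cast; omega
          have hwmem : w ∈ ws := hperm.mem_iff.mp List.mem_cons_self
          rw [hcw, hcount w]
          exact hmub w hwmem
        · have hck : pvRunScan 1 1 w rest = ((w :: rest).count k : Int) := by
            rw [hkc, List.count_cons_of_ne (Ne.symm hkne)]
          have hkmem : k ∈ ws := hperm.mem_iff.mp (List.mem_cons_of_mem _ hk)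
          rw [hck, hcount k]
          exact hmub k hkmem
      show m = pvRunScan 1 1 w rest
      omega
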